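-- pv_equiv track=rewrite | github.com/ajul/cuda_texture_hash | long_period/long_period.py | generateHashTerm
-- ===== SOURCE A (Python) =====
-- _permutationVariableName = '_permutation'
--
-- def generateHashTerm(offset, factor, argi):
--     if offset > 0: offsetAddString = '%3d + ' % offset
--     else: offsetAddString = ' ' * 6
--
--     if argi == 0:
--         moduloTerm = '(arg0 %% %d)' % factor
--     else:
--         moduloTerm = '((%s + arg%d) %% %d)' % (
--             generateHashTerm(offset, factor, argi - 1),
--             argi,
--             factor)
--
--     return '%s%d[%s%s]' % (
--         _permutationVariableName,
--         factor,
--         offsetAddString,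
--         moduloTerm)
-- ===== SOURCE B (Python) =====
-- _permutationVariableName = '_permutation'
--
-- def generateHashTerm(offset, factor, argi):
--     offsetAddString = '%3d + ' % offset if offset > 0 else ' ' * 6
--     head = '%s%d[%s((' % (_permutationVariableName, factor, offsetAddString)
--     base = '%s%d[%s(arg0 %% %d)]' % (_permutationVariableName, factor, offsetAddString, factor)
--     tail = ''.join(' + arg%d) %% %d)]' % (i, factor) for i in range(1, argi + 1))
--     return head * argi + base + tail
-- ===== Notes on version B (the rewrite author's own statement) =====
-- stated objective: alternative
-- what changed: Replaced A's top-down recursion with flat string assembly: the constant wrapper prefix repeated argi times via string multiplication, the innermost arg0 term, then a joined sequence of per-level suffixes, so the growing expression is never re-copied per level.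
import Mathlib
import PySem

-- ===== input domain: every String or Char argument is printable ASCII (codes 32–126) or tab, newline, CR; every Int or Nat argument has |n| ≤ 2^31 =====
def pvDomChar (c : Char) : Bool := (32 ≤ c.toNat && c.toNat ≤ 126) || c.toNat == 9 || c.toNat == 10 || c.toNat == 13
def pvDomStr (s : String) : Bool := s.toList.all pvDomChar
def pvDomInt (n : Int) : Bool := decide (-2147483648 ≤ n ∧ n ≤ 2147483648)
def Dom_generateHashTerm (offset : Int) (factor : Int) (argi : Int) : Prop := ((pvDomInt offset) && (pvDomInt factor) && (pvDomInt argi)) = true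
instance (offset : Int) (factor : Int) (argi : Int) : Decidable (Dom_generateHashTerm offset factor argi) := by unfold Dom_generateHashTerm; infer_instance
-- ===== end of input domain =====

-- B replaces A's top-down recursion by flat assembly (repeated constant prefix + base + joined suffixes), avoiding re-copying the growing expression each level; return values proved equal for argi ≥ 0 (A recurses forever on argi < 0).

-- ===== PORT A =====
-- '%3d + ' % offset  (right-justified to width 3, only used for offset > 0)
def pvOffsetAdd (offset : Int) : List Char :=
  if offset > 0 then
    List.replicate (3 - (PySem.Int.toChars offset).length) ' ' ++ PySem.Int.toChars offset ++ " + ".toList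
  else List.replicate 6 ' '

-- A's recursion, on the Nat value of argi (Python A only returns for argi ≥ 0)
def generateHashTermAuxA (offset : Int) (factor : Int) : Nat → List Char
  | 0 =>
      "_permutation".toList ++ PySem.Int.toChars factor ++ "[".toList ++ pvOffsetAdd offset
        ++ "(arg0 % ".toList ++ PySem.Int.toChars factor ++ ")]".toList
  | n + 1 =>
      "_permutation".toList ++ PySem.Int.toChars factor ++ "[".toList ++ pvOffsetAdd offset
        ++ "((".toList ++ generateHashTermAuxA offset factor n ++ " + arg".toList
        ++ PySem.Int.toChars ((n : Int) + 1) ++ ") % ".toList ++ PySem.Int.toChars factor ++ ")]".toList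

def generateHashTerm (offset : Int) (factor : Int) (argi : Int) : String :=
  String.ofList (generateHashTermAuxA offset factor argi.toNat)

-- ===== PORT B =====
-- one per-level suffix ' + arg%d) %% %d)]' % (i, factor)
def pvSuffixB (factor : Int) (i : Int) : List Char :=
  " + arg".toList ++ PySem.Int.toChars i ++ ") % ".toList ++ PySem.Int.toChars factor ++ ")]".toList

def generateHashTerm_alt (offset : Int) (factor : Int) (argi : Int) : String :=
  let off := pvOffsetAdd offset
  let head := "_permutation".toList ++ PySem.Int.toChars factor ++ "[".toList ++ off ++ "((".toList
  let base := "_permutation".toList ++ PySem.Int.toChars factor ++ "[".toList ++ off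
                ++ "(arg0 % ".toList ++ PySem.Int.toChars factor ++ ")]".toList
  let tail := (PySem.List.pyRange 1 (argi + 1) 1).flatMap (pvSuffixB factor)
  String.ofList ((List.replicate argi.toNat head).flatten ++ base ++ tail)

-- ===== PRECONDITION & SPEC =====
-- Pre_ excludes argi < 0, where Python A recurses without bound (RecursionError).
def Pre_generateHashTerm (offset : Int) (factor : Int) (argi : Int) : Prop := 0 ≤ argi
instance (offset : Int) (factor : Int) (argi : Int) : Decidable (Pre_generateHashTerm offset factor argi) := by unfold Pre_generateHashTerm; infer_instance
def pvWitness_generateHashTerm : Int × Int × Int := (2, 5, 1)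

def Spec_generateHashTerm (offset : Int) (factor : Int) (argi : Int) (out : String) : Prop := out = generateHashTerm_alt offset factor argi
instance (offset : Int) (factor : Int) (argi : Int) (out : String) : Decidable (Spec_generateHashTerm offset factor argi out) := by unfold Spec_generateHashTerm; infer_instance

-- ===== CLAIM (what is proved, stated in full; the proofs are below) =====
def Claim_equal_generateHashTerm : Prop := ∀ (offset : Int) (factor : Int) (argi : Int), Dom_generateHashTerm offset factor argi → Pre_generateHashTerm offset factor argi → Spec_generateHashTerm offset factor argi (generateHashTerm offset factor argi)

-- ===== LEMMAS AND PROOFS =====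
theorem auxA_eq_flat (offset factor : Int) (n : Nat) :
    generateHashTermAuxA offset factor n
      = (List.replicate n ("_permutation".toList ++ PySem.Int.toChars factor ++ "[".toList
            ++ pvOffsetAdd offset ++ "((".toList)).flatten
        ++ ("_permutation".toList ++ PySem.Int.toChars factor ++ "[".toList ++ pvOffsetAdd offset
            ++ "(arg0 % ".toList ++ PySem.Int.toChars factor ++ ")]".toList)
        ++ (PySem.List.pyRange 1 ((n : Int) + 1) 1).flatMap (pvSuffixB factor) := by
  induction n with
  | zero =>
      rw [PySem.List.pyRange_one_eq_nil (by norm_num)]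
      simp [generateHashTermAuxA]
  | succ n ih =>
      have h : PySem.List.pyRange 1 ((n : Int) + 1 + 1) 1
          = PySem.List.pyRange 1 ((n : Int) + 1) 1 ++ [(n : Int) + 1] :=
        PySem.List.pyRange_one_succ_right (by omega)
      push_cast
      rw [h, List.flatMap_append, List.replicate_succ, List.flatten_cons]
      simp only [generateHashTermAuxA, ih, pvSuffixB, List.flatMap_cons, List.flatMap_nil,
        List.append_nil, List.append_assoc]
      rfl

-- ===== VERDICT (by name: the statement is the Claim_ definition above) =====
theorem generateHashTerm_spec : Claim_equal_generateHashTerm := by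
  intro offset factor argi _ hpre
  unfold Pre_generateHashTerm at hpre
  unfold Spec_generateHashTerm generateHashTerm generateHashTerm_alt
  rw [auxA_eq_flat]
  have h : ((argi.toNat : Int) + 1) = argi + 1 := by omega
  rw [h]
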